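-- pv_equiv track=rewrite | github.com/kyuminKim00/Algorithm-study | Greedy.py | solution
-- ===== SOURCE A (Python) =====
-- def solution(food_times, k):
--     for i in range(k-1):
--
--         if sum(food_times) == 0:
--             return -1
--
--         index = i%len(food_times)
--         if food_times[index] != 0:
--             food_times[index] -= 1
--
--         else:
--             index +=1
--             index = index%len(food_times)
--             while True:
--                 if food_times[index] != 0:
--                     food_times[index] -=1
--                     break
--                 else:
--                     index +=1
--                     index = index%len(food_times)
--         answer = index+1
--
--     return answer
-- ===== SOURCE B (Python) =====
-- def _bisect_left(a, x):
--     lo, hi = 0, len(a)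
--     while lo < hi:
--         mid = (lo + hi) // 2
--         if a[mid] < x:
--             lo = mid + 1
--         else:
--             hi = mid
--     return lo
--
--
-- def solution(food_times, k):
--     steps = k - 1
--     total = sum(food_times)
--     # A's per-step "sum == 0 -> -1" exit fires exactly when the running sum
--     # total - i hits 0 for some i in [0, steps), i.e. 0 <= total < steps.
--     if 0 <= total < steps:
--         return -1
--     n = len(food_times)
--     counts = list(food_times)
--     # sorted set of the indices holding a nonzero count; the eaten index each
--     # second is found by binary search (cyclic successor), never by scanning.
--     nz = [j for j in range(n) if counts[j] != 0]
--     answer = 0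
--     for i in range(steps):
--         pos = _bisect_left(nz, i % n)
--         if pos == len(nz):
--             pos = 0
--         j = nz[pos]
--         counts[j] -= 1
--         answer = j + 1
--         if counts[j] == 0:
--             del nz[pos]
--     return answer
-- ===== Notes on version B (the rewrite author's own statement) =====
-- stated objective: faster
-- what changed: B replaces A's per-step full resummation and cyclic zero-skipping scan by one closed-form feasibility test up front (return -1 iff 0 <= sum < k-1) plus a maintained sorted list of nonzero indices queried by binary search (cyclic successor) each second, deleting an index when its count hits zero.
import Mathlib
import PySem

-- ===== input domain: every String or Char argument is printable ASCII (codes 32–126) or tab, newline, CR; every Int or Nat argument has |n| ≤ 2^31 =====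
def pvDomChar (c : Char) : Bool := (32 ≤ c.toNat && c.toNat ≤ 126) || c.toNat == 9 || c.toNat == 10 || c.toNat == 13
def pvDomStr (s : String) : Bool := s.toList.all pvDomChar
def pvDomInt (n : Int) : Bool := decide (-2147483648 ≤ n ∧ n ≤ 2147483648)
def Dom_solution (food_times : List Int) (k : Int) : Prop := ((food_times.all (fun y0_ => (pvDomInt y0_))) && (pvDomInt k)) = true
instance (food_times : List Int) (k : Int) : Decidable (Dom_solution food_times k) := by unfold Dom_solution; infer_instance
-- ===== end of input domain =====

-- B replaces A's per-step resummation and cyclic zero-skipping scan by one up-front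
-- feasibility test (-1 iff 0 ≤ sum < k-1) plus a maintained sorted list of nonzero
-- indices queried by binary search each second (measured faster in a timing run).
-- Python A mutates food_times in place (decrements entries); the equivalence proved
-- here is about the return value only (B works on a copy).

-- ===== PORT A =====
-- A's `if food_times[index] != 0 … else while True …`: first cyclic position with a
-- nonzero entry, starting at j.  fuel bounds the while loop; it is never exhausted on
-- inputs A terminates on (the sum check guarantees a nonzero entry within n probes).
def scanA (foods : List Int) (n : Nat) (j : Nat) : Nat → Nat
  | 0 => j
  | fuel+1 => if foods.getD j 0 != 0 then j else scanA foods n ((j+1) % n) fuel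

-- the `for i in range(k-1)` loop; `answer` starts at 0 (Python leaves it unbound, which
-- only shows for k ≤ 1, excluded by Pre_solution).
def loopA (foods : List Int) (answer : Int) (i : Nat) : Nat → Int
  | 0 => answer
  | steps+1 =>
    if foods.sum = 0 then -1
    else
      let n := foods.length
      let index := scanA foods n (i % n) n
      loopA (foods.set index (foods.getD index 0 - 1)) (Int.ofNat (index+1)) (i+1) steps

def solution (food_times : List Int) (k : Int) : Int :=
  loopA food_times 0 0 (k-1).toNat

-- ===== PORT B =====
-- B's helper _bisect_left: the `while lo < hi` binary-search loop
def bisectLeft (xs : List Nat) (x : Nat) (lo hi : Nat) : Nat :=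
  if _h : lo < hi then
    let mid := (lo + hi) / 2
    if xs.getD mid 0 < x then bisectLeft xs x (mid + 1) hi
    else bisectLeft xs x lo mid
  else lo
termination_by hi - lo
decreasing_by all_goals omega

-- B's `for i in range(steps)` loop over (counts, nz = sorted nonzero-index list)
def loopB (counts : List Int) (nz : List Nat) (answer : Int) (i : Nat) : Nat → Int
  | 0 => answer
  | steps+1 =>
    let pos0 := bisectLeft nz (i % counts.length) 0 nz.length
    let pos := if pos0 = nz.length then 0 else pos0
    let j := nz.getD pos 0
    let counts' := counts.set j (counts.getD j 0 - 1)
    let nz' := if counts'.getD j 0 = 0 then nz.eraseIdx pos else nz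
    loopB counts' nz' (Int.ofNat (j+1)) (i+1) steps

def solution_alt (food_times : List Int) (k : Int) : Int :=
  let steps := k - 1
  let total := food_times.sum
  if 0 ≤ total ∧ total < steps then -1
  else
    let nz := (List.range food_times.length).filter (fun m => food_times.getD m 0 != 0)
    loopB food_times nz 0 0 steps.toNat

-- ===== PRECONDITION & SPEC =====
-- Python A raises NameError (answer unbound) whenever k ≤ 1: the loop body never runs.
def Pre_solution (food_times : List Int) (k : Int) : Prop := 2 ≤ k
instance (food_times : List Int) (k : Int) : Decidable (Pre_solution food_times k) := by unfold Pre_solution; infer_instance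
def pvWitness_solution : List Int × Int := ([3, 1, 2], 5)

def Spec_solution (food_times : List Int) (k : Int) (out : Int) : Prop := out = solution_alt food_times k
instance (food_times : List Int) (k : Int) (out : Int) : Decidable (Spec_solution food_times k out) := by unfold Spec_solution; infer_instance

-- ===== CLAIM (what is proved, stated in full; the proofs are below) =====
def Claim_equal_solution : Prop := ∀ (food_times : List Int) (k : Int), Dom_solution food_times k → Pre_solution food_times k → Spec_solution food_times k (solution food_times k)

-- ===== LEMMAS AND PROOFS =====

-- the nonzero-index-set invariant maintained by B's loop
def NzInv (counts : List Int) (nz : List Nat) : Prop :=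
  nz = (List.range counts.length).filter (fun m => counts.getD m 0 != 0)

-- scanA stays below n
theorem scanA_lt (foods : List Int) (n : Nat) (hn : 0 < n) :
    ∀ (m j : Nat), j < n → scanA foods n j m < n := by
  intro m
  induction m with
  | zero => intro j hj; simpa [scanA] using hj
  | succ m ih =>
    intro j hj
    unfold scanA
    split
    · exact hj
    · exact ih _ (Nat.mod_lt _ hn)

-- sum after decrementing entry j
theorem sum_set_dec (l : List Int) (j : Nat) (hj : j < l.length) :
    (l.set j (l.getD j 0 - 1)).sum = l.sum - 1 := by
  induction l generalizing j with
  | nil => simp at hj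
  | cons a l ih =>
    cases j with
    | zero => simp [List.getD]; ring
    | succ j =>
      simp only [List.length_cons, Nat.succ_lt_succ_iff] at hj
      simp only [List.set_cons_succ, List.getD_cons_succ, List.sum_cons]
      rw [ih j hj]
      ring

-- characterization of scanA as a find? over the candidate positions
theorem scanA_char (foods : List Int) (n : Nat) (hn : 0 < n) :
    ∀ (m j : Nat), j < n →
      scanA foods n j m =
        (((List.range m).map (fun d => (j + d) % n)).find?
            (fun x => foods.getD x 0 != 0)).getD ((j + m) % n) := by
  intro m
  induction m with
  | zero =>
    intro j hj
    simp [scanA, Nat.mod_eq_of_lt hj]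
  | succ m ih =>
    intro j hj
    have hlist : (List.range (m+1)).map (fun d => (j + d) % n) =
        j :: (List.range m).map (fun d => ((j + 1) % n + d) % n) := by
      rw [List.range_succ_eq_map, List.map_cons, List.map_map]
      congr 1
      · simp [Nat.mod_eq_of_lt hj]
      · apply List.map_congr_left
        intro d _
        simp only [Function.comp_apply]
        rw [Nat.mod_add_mod]
        congr 1
        omega
    rw [hlist]
    cases hp : (foods.getD j 0 != 0) with
    | true =>
      have hp' : ¬ foods[j]?.getD 0 = 0 := by
        simpa [List.getD_eq_getElem?_getD] using hp
      rw [List.find?_cons_of_pos (by exact hp)]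
      simp [scanA, hp']
    | false =>
      have hp' : foods[j]?.getD 0 = 0 := by
        simpa [List.getD_eq_getElem?_getD] using hp
      rw [List.find?_cons_of_neg (by exact ne_true_of_eq_false hp)]
      have hfb : ((j + 1) % n + m) % n = (j + (m + 1)) % n := by
        rw [Nat.mod_add_mod]
        congr 1
        omega
      unfold scanA
      rw [if_neg (by simp [List.getD_eq_getElem?_getD, hp'])]
      rw [ih _ (Nat.mod_lt _ hn), hfb]

-- find? over range n returns the least witness
theorem range_find?_eq (q : Nat → Bool) :
    ∀ (n d : Nat), d < n → q d = true → (∀ e, e < d → q e = false) →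
      (List.range n).find? q = some d := by
  intro n
  induction n with
  | zero => intro d hd; omega
  | succ n ih =>
    intro d hd hq hmin
    rw [List.range_succ, List.find?_append]
    by_cases hdn : d < n
    · rw [ih d hdn hq hmin]; rfl
    · have hdeq : d = n := by omega
      subst hdeq
      have hnone : (List.range d).find? q = none :=
        List.find?_eq_none.mpr (fun x hx => by
          simp [hmin x (List.mem_range.mp hx)])
      rw [hnone]
      simp [hq]

-- a sorted list has monotone getD on in-range indices
theorem sorted_getD_mono (l : List Nat) (hs : l.Pairwise (· < ·))
    (a b : Nat) (hab : a ≤ b) (hb : b < l.length) : l.getD a 0 ≤ l.getD b 0 := by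
  rcases Nat.lt_or_ge a b with h | h
  · have ha : a < l.length := lt_trans h hb
    rw [List.getD_eq_getElem?_getD, List.getElem?_eq_getElem ha,
        List.getD_eq_getElem?_getD, List.getElem?_eq_getElem hb]
    exact le_of_lt (List.pairwise_iff_getElem.mp hs a b ha hb h)
  · have : a = b := by omega
    subst this; exact le_rfl

-- binary-search invariant: bisectLeft splits the (sorted w.r.t. the predicate) list
theorem bisect_inv (xs : List Nat) (x : Nat)
    (hmono : ∀ a b : Nat, a ≤ b → b < xs.length → xs.getD b 0 < x → xs.getD a 0 < x) :
    ∀ (d lo hi : Nat), hi - lo ≤ d → lo ≤ hi → hi ≤ xs.length →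
      (∀ i, i < lo → xs.getD i 0 < x) →
      (∀ i, hi ≤ i → i < xs.length → ¬ xs.getD i 0 < x) →
      bisectLeft xs x lo hi ≤ hi ∧
      (∀ i, i < bisectLeft xs x lo hi → xs.getD i 0 < x) ∧
      (∀ i, bisectLeft xs x lo hi ≤ i → i < xs.length → ¬ xs.getD i 0 < x) := by
  intro d
  induction d with
  | zero =>
    intro lo hi hd hlohi hhi h1 h2
    have : lo = hi := by omega
    subst this
    rw [bisectLeft, dif_neg (by omega)]
    exact ⟨le_rfl, h1, h2⟩
  | succ d ih =>
    intro lo hi hd hlohi hhi h1 h2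
    rw [bisectLeft]
    by_cases h : lo < hi
    · rw [dif_pos h]
      have hmid1 : lo ≤ (lo + hi) / 2 := by omega
      have hmid2 : (lo + hi) / 2 < hi := by omega
      by_cases hx : xs.getD ((lo + hi) / 2) 0 < x
      · rw [if_pos hx]
        refine ih ((lo + hi) / 2 + 1) hi (by omega) (by omega) hhi ?_ h2
        intro i hi'
        exact hmono i ((lo + hi) / 2) (by omega) (by omega) hx
      · rw [if_neg hx]
        refine ih lo ((lo + hi) / 2) (by omega) (by omega) (by omega) h1 ?_ |>.imp
          (fun h' => by omega) id
        intro i hi1 hi2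
        intro hcon
        exact hx (hmono ((lo + hi) / 2) i hi1 hi2 hcon)
    · rw [dif_neg h]
      have : lo = hi := by omega
      subst this
      exact ⟨le_rfl, h1, h2⟩

-- basic facts extracted from the invariant
theorem nzinv_mem (counts : List Int) (nz : List Nat) (hnz : NzInv counts nz) (m : Nat) :
    m ∈ nz ↔ m < counts.length ∧ counts.getD m 0 ≠ 0 := by
  rw [hnz]
  simp [List.mem_filter, List.mem_range]

theorem nzinv_sorted (counts : List Int) (nz : List Nat) (hnz : NzInv counts nz) :
    nz.Pairwise (· < ·) := by
  rw [hnz]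
  exact List.pairwise_lt_range.filter _

theorem nzinv_nodup (counts : List Int) (nz : List Nat) (hnz : NzInv counts nz) :
    nz.Nodup :=
  (nzinv_sorted counts nz hnz).imp Nat.ne_of_lt

theorem getD_mem (l : List Nat) (pos : Nat) (h : pos < l.length) : l.getD pos 0 ∈ l := by
  rw [List.getD_eq_getElem?_getD, List.getElem?_eq_getElem h]
  exact List.getElem_mem h

-- a nonzero sum yields a nonzero entry, hence a nonempty nz
theorem exists_nonzero (counts : List Int) (hs : counts.sum ≠ 0) :
    ∃ m, ∃ h : m < counts.length, counts[m] ≠ 0 := by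
  by_contra h
  push_neg at h
  apply hs
  apply List.sum_eq_zero
  intro x hx
  obtain ⟨m, hm, rfl⟩ := List.mem_iff_getElem.mp hx
  exact h m hm

theorem nzinv_ne_nil (counts : List Int) (nz : List Nat) (hnz : NzInv counts nz)
    (hs : counts.sum ≠ 0) : nz ≠ [] := by
  obtain ⟨m, hm, hmz⟩ := exists_nonzero counts hs
  intro hcon
  have : m ∈ nz := (nzinv_mem counts nz hnz m).mpr
    ⟨hm, by simpa [List.getD_eq_getElem?_getD, List.getElem?_eq_getElem hm] using hmz⟩
  rw [hcon] at this
  exact List.not_mem_nil this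

-- every element of nz below / at-least start bounds: the picked element equals scanA
theorem pick_eq_scanA (counts : List Int) (nz : List Nat) (hnz : NzInv counts nz)
    (hs : counts.sum ≠ 0) (start : Nat) (hstart : start < counts.length) :
    (if bisectLeft nz start 0 nz.length = nz.length then 0
       else bisectLeft nz start 0 nz.length) < nz.length ∧
    nz.getD (if bisectLeft nz start 0 nz.length = nz.length then 0
       else bisectLeft nz start 0 nz.length) 0 =
      scanA counts counts.length start counts.length := by
  have hn : 0 < counts.length := by omega
  have hsort := nzinv_sorted counts nz hnz
  have hne := nzinv_ne_nil counts nz hnz hs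
  have hlen : 0 < nz.length := List.length_pos_iff.mpr hne
  have hmono : ∀ a b : Nat, a ≤ b → b < nz.length → nz.getD b 0 < start → nz.getD a 0 < start :=
    fun a b hab hb hlt => lt_of_le_of_lt (sorted_getD_mono nz hsort a b hab hb) hlt
  obtain ⟨hr_le, hP1, hP2⟩ :=
    bisect_inv nz start hmono nz.length 0 nz.length (by omega) (by omega) le_rfl
      (by omega) (by omega)
  set r := bisectLeft nz start 0 nz.length with hrdef
  set pos := if r = nz.length then 0 else r with hposdef
  have hpos_lt : pos < nz.length := by
    rw [hposdef]; split <;> omega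
  refine ⟨hpos_lt, ?_⟩
  set j := nz.getD pos 0 with hjdef
  have hjmem : j ∈ nz := getD_mem nz pos hpos_lt
  obtain ⟨hjn, hjnz⟩ := (nzinv_mem counts nz hnz j).mp hjmem
  -- the element least-index facts
  have hmem_lt_start : ∀ m ∈ nz, (∀ i, i < nz.length → nz.getD i 0 < start) → m < start := by
    intro m hm hall
    obtain ⟨i, hi, rfl⟩ := List.mem_iff_getElem.mp hm
    have := hall i hi
    rwa [List.getD_eq_getElem?_getD, List.getElem?_eq_getElem hi] at this
  -- rewrite scanA via its find? characterization
  rw [scanA_char counts counts.length hn counts.length start hstart]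
  rw [List.find?_map]
  -- choose the minimal offset d and show find? returns it
  by_cases hcase : r < nz.length
  · -- pos = r : j is the least element of nz that is ≥ start
    have hposr : pos = r := by rw [hposdef, if_neg (by omega)]
    have hstart_le_j : start ≤ j := by
      have := hP2 r le_rfl hcase
      rw [hjdef, hposr]; omega
    have hd : j - start < counts.length := by omega
    have hfd : (start + (j - start)) % counts.length = j := by
      rw [Nat.add_sub_cancel' hstart_le_j, Nat.mod_eq_of_lt hjn]
    have hqd : (fun x => counts.getD x 0 != 0) ((start + (j - start)) % counts.length) = true := by
      rw [hfd]; simpa using hjnz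
    have hmin : ∀ e, e < j - start →
        (fun x => counts.getD x 0 != 0) ((start + e) % counts.length) = false := by
      intro e he
      have hlt : start + e < counts.length := by omega
      rw [Nat.mod_eq_of_lt hlt]
      by_contra hcon
      have hpm : counts.getD (start + e) 0 ≠ 0 := by
        simpa using ne_false_of_eq_true (eq_true_of_ne_false hcon)
      have hmem : start + e ∈ nz := (nzinv_mem counts nz hnz _).mpr ⟨hlt, hpm⟩
      obtain ⟨i, hi, hieq⟩ := List.mem_iff_getElem.mp hmem
      have higetD : nz.getD i 0 = start + e := by
        simp [List.getD_eq_getElem?_getD, List.getElem?_eq_getElem hi, hieq]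
      rcases Nat.lt_or_ge i r with hir | hir
      · have := hP1 i hir; omega
      · have h1 : nz.getD r 0 ≤ nz.getD i 0 := sorted_getD_mono nz hsort r i hir hi
        rw [higetD] at h1
        rw [hjdef, hposr] at *
        omega
    rw [show ((fun x => counts.getD x 0 != 0) ∘ fun d => (start + d) % counts.length)
          = (fun e => counts.getD ((start + e) % counts.length) 0 != 0) from rfl]
    rw [range_find?_eq _ counts.length (j - start) hd hqd hmin]
    simp [hfd]
  · -- pos = 0 : every element of nz is < start; j is the minimum of nz (wrap-around)
    have hrlen : r = nz.length := by omega
    have hposr : pos = 0 := by rw [hposdef, if_pos hrlen]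
    have hall_lt : ∀ i, i < nz.length → nz.getD i 0 < start := by
      intro i hi; exact hP1 i (by omega)
    have hj_lt_start : j < start := by
      rw [hjdef, hposr]; exact hall_lt 0 hlen
    have hd : j + counts.length - start < counts.length := by omega
    have hfd : (start + (j + counts.length - start)) % counts.length = j := by
      have h1 : start + (j + counts.length - start) = j + counts.length := by omega
      rw [h1, Nat.add_mod_right, Nat.mod_eq_of_lt hjn]
    have hqd : (fun x => counts.getD x 0 != 0) ((start + (j + counts.length - start)) % counts.length) = true := by
      rw [hfd]; simpa using hjnz
    have hmin : ∀ e, e < j + counts.length - start →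
        (fun x => counts.getD x 0 != 0) ((start + e) % counts.length) = false := by
      intro e he
      by_contra hcon
      have hpm : counts.getD ((start + e) % counts.length) 0 ≠ 0 := by
        simpa using ne_false_of_eq_true (eq_true_of_ne_false hcon)
      have hmlt : (start + e) % counts.length < counts.length := Nat.mod_lt _ hn
      have hmem : (start + e) % counts.length ∈ nz :=
        (nzinv_mem counts nz hnz _).mpr ⟨hmlt, hpm⟩
      obtain ⟨i, hi, hieq⟩ := List.mem_iff_getElem.mp hmem
      have higetD : nz.getD i 0 = (start + e) % counts.length := by
        simp [List.getD_eq_getElem?_getD, List.getElem?_eq_getElem hi, hieq]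
      rcases Nat.lt_or_ge (start + e) counts.length with hse | hse
      · -- position ≥ start, but all elements are < start
        rw [Nat.mod_eq_of_lt hse] at higetD
        have := hall_lt i hi
        omega
      · -- wrapped position is < j, but j = nz[0] is the minimum
        have hse2 : start + e < 2 * counts.length := by omega
        have hmod : (start + e) % counts.length = start + e - counts.length := by
          rw [Nat.mod_eq_sub_mod hse, Nat.mod_eq_of_lt (by omega)]
        rw [hmod] at higetD
        have hminel : nz.getD 0 0 ≤ nz.getD i 0 := sorted_getD_mono nz hsort 0 i (by omega) hi
        rw [hjdef, hposr] at *
        omega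
    rw [show ((fun x => counts.getD x 0 != 0) ∘ fun d => (start + d) % counts.length)
          = (fun e => counts.getD ((start + e) % counts.length) 0 != 0) from rfl]
    rw [range_find?_eq _ counts.length (j + counts.length - start) hd hqd hmin]
    simp [hfd]

-- getD after set
theorem getD_set_self (l : List Int) (i : Nat) (hi : i < l.length) (a : Int) :
    (l.set i a).getD i 0 = a := by
  simp [List.getD_eq_getElem?_getD, hi]

theorem getD_set_ne (l : List Int) (i m : Nat) (h : i ≠ m) (a : Int) :
    (l.set i a).getD m 0 = l.getD m 0 := by
  simp [List.getD_eq_getElem?_getD, List.getElem?_set, h]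

-- deleting the element at index pos from a nodup list = filtering its value out
theorem eraseIdx_eq_filter_ne :
    ∀ (l : List Nat) (pos : Nat), l.Nodup → pos < l.length →
      l.eraseIdx pos = l.filter (fun m => !(m == l.getD pos 0)) := by
  intro l
  induction l with
  | nil => intro pos _ h; simp at h
  | cons a t ih =>
    intro pos hnd hpos
    cases pos with
    | zero =>
      simp only [List.eraseIdx_cons_zero, List.getD_cons_zero, List.filter_cons,
        beq_self_eq_true, Bool.not_true, Bool.false_eq_true, if_false]
      rw [List.filter_eq_self.mpr]
      intro m hm
      have hma : m ≠ a := fun hcon => (List.nodup_cons.mp hnd).1 (hcon ▸ hm)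
      simp [hma]
    | succ pos =>
      simp only [List.length_cons, Nat.succ_lt_succ_iff] at hpos
      have hnd' := List.nodup_cons.mp hnd
      have hvmem : t.getD pos 0 ∈ t := getD_mem t pos hpos
      have hane : (a == (a :: t).getD (pos+1) 0) = false := by
        simp only [List.getD_cons_succ, beq_eq_false_iff_ne]
        intro hcon
        rw [hcon] at hnd'
        exact hnd'.1 hvmem
      simp only [List.eraseIdx_cons_succ, List.filter_cons, hane, Bool.not_false, if_true]
      rw [ih pos hnd'.2 hpos]
      simp

-- the invariant is preserved by one step of B's loop
theorem nzinv_step (counts : List Int) (nz : List Nat) (hnz : NzInv counts nz)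
    (pos : Nat) (hpos : pos < nz.length) :
    NzInv (counts.set (nz.getD pos 0) (counts.getD (nz.getD pos 0) 0 - 1))
      (if (counts.set (nz.getD pos 0) (counts.getD (nz.getD pos 0) 0 - 1)).getD (nz.getD pos 0) 0 = 0
        then nz.eraseIdx pos else nz) := by
  set j := nz.getD pos 0 with hjdef
  have hjmem : j ∈ nz := getD_mem nz pos hpos
  obtain ⟨hjn, hjnz⟩ := (nzinv_mem counts nz hnz j).mp hjmem
  set counts' := counts.set j (counts.getD j 0 - 1) with hcdef
  have hlen' : counts'.length = counts.length := by
    rw [hcdef, List.length_set]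
  have hgetj : counts'.getD j 0 = counts.getD j 0 - 1 := getD_set_self counts j hjn _
  have hgetne : ∀ m, m ≠ j → counts'.getD m 0 = counts.getD m 0 := by
    intro m hm
    exact getD_set_ne counts j m (fun h => hm h.symm) _
  unfold NzInv
  rw [hlen']
  by_cases hz : counts'.getD j 0 = 0
  · rw [if_pos hz]
    rw [eraseIdx_eq_filter_ne nz pos (nzinv_nodup counts nz hnz) hpos, ← hjdef]
    rw [hnz, List.filter_filter]
    apply List.filter_congr
    intro m hm
    by_cases hmj : m = j
    · subst hmj
      rw [hz]
      simp
    · rw [hgetne m hmj]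
      simp [hmj]
  · rw [if_neg hz]
    rw [hnz]
    apply List.filter_congr
    intro m hm
    by_cases hmj : m = j
    · subst hmj
      rw [show counts'.getD j 0 = counts.getD j 0 - 1 from hgetj]
      have h1 : (counts.getD j 0 != 0) = true := by simpa using hjnz
      have h2 : (counts.getD j 0 - 1 != 0) = true := by
        rw [← hgetj]; simpa using hz
      rw [h1, h2]
    · rw [hgetne m hmj]

-- A returns -1 when 0 ≤ sum < steps
theorem loopA_neg_one (steps : Nat) :
    ∀ (foods : List Int) (answer : Int) (i : Nat),
      0 ≤ foods.sum → foods.sum < (steps : Int) →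
      loopA foods answer i steps = -1 := by
  induction steps with
  | zero => intro foods answer i h0 h1; omega
  | succ s ih =>
    intro foods answer i h0 h1
    unfold loopA
    by_cases hz : foods.sum = 0
    · simp [hz]
    · rw [if_neg hz]
      have hn : 0 < foods.length := by
        rcases foods with _ | ⟨a, l⟩
        · simp at hz
        · simp
      have hidx : scanA foods foods.length (i % foods.length) foods.length < foods.length :=
        scanA_lt foods foods.length hn foods.length _ (Nat.mod_lt _ hn)
      apply ih
      · rw [sum_set_dec _ _ hidx]; omega
      · rw [sum_set_dec _ _ hidx]; push_cast; omega

-- A's loop equals B's loop when the running sum never hits zero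
theorem loopA_eq_loopB (steps : Nat) :
    ∀ (counts : List Int) (nz : List Nat) (answer : Int) (i : Nat),
      (∀ t : Nat, t < steps → counts.sum ≠ (t : Int)) →
      NzInv counts nz →
      loopA counts answer i steps = loopB counts nz answer i steps := by
  induction steps with
  | zero => intro counts nz answer i _ _; rfl
  | succ s ih =>
    intro counts nz answer i h hnz
    have hz : counts.sum ≠ 0 := by simpa using h 0 (Nat.succ_pos s)
    unfold loopA loopB
    rw [if_neg hz]
    have hn : 0 < counts.length := by
      rcases counts with _ | ⟨a, l⟩
      · simp at hz
      · simp
    have hstart : i % counts.length < counts.length := Nat.mod_lt _ hn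
    obtain ⟨hpos_lt, hpick⟩ := pick_eq_scanA counts nz hnz hz (i % counts.length) hstart
    simp only
    rw [hpick]
    set index := scanA counts counts.length (i % counts.length) counts.length with hidef
    have hidx : index < counts.length :=
      scanA_lt counts counts.length hn counts.length _ hstart
    apply ih
    · intro t ht
      rw [sum_set_dec _ _ hidx]
      have := h (t + 1) (by omega)
      push_cast at this ⊢
      omega
    · have := nzinv_step counts nz hnz
        (if bisectLeft nz (i % counts.length) 0 nz.length = nz.length then 0
          else bisectLeft nz (i % counts.length) 0 nz.length) hpos_lt
      rwa [hpick] at this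

-- ===== VERDICT (by name: the statement is the Claim_ definition above) =====
theorem solution_spec : Claim_equal_solution := by
  intro food_times k _ hpre
  unfold Spec_solution solution solution_alt
  have hk : 2 ≤ k := hpre
  have hsteps : ((k - 1).toNat : Int) = k - 1 := Int.toNat_of_nonneg (by omega)
  by_cases hc : 0 ≤ food_times.sum ∧ food_times.sum < k - 1
  · rw [if_pos hc]
    exact loopA_neg_one (k - 1).toNat food_times 0 0 hc.1 (by rw [hsteps]; exact hc.2)
  · rw [if_neg hc]
    apply loopA_eq_loopB
    · intro t ht
      intro hsum
      apply hc
      constructor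
      · rw [hsum]; positivity
      · rw [hsum]
        have : (t : Int) < ((k - 1).toNat : Int) := by exact_mod_cast ht
        omega
    · rfl
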